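-- pv_equiv track=rewrite | github.com/vjranagit/awx | awx/sso/utils/github_migrator.py | _build_additional_config
-- ===== SOURCE A (Python) =====
-- def _build_additional_config(category, settings):
--     """Build additional configuration for specific authenticator types."""
--     additional_config = {}
--
--     # Add scope configuration if present
--     for setting_name, value in settings.items():
--         if setting_name.endswith('_SCOPE') and value:
--             additional_config['SCOPE'] = value
--             break
--
--     # Add GitHub Enterprise URL if present
--     if 'enterprise' in category:
--         for setting_name, value in settings.items():
--             if setting_name.endswith('_API_URL') and value:
--                 additional_config['API_URL'] = value
--             elif setting_name.endswith('_URL') and value: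
--                 additional_config['URL'] = value
--
--     # Add organization name for org-specific authenticators
--     if 'org' in category:
--         for setting_name, value in settings.items():
--             if setting_name.endswith('_NAME') and value:
--                 additional_config['NAME'] = value
--                 break
--
--     # Add team ID for team-specific authenticators
--     if 'team' in category:
--         for setting_name, value in settings.items():
--             if setting_name.endswith('_ID') and value:
--                 additional_config['ID'] = value
--                 break
--
--     return additional_config
-- ===== SOURCE B (Python) =====
-- def _build_additional_config(category, settings):
--     """Build additional configuration for specific authenticator types."""
--     scope = api_url = url = org_name = team_id = None
--     for key, value in settings.items():
--         if not value:
--             continue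
--         if scope is None and key.endswith('_SCOPE'):
--             scope = value
--         if key.endswith('_API_URL'):
--             api_url = value
--         elif key.endswith('_URL'):
--             url = value
--         if org_name is None and key.endswith('_NAME'):
--             org_name = value
--         if team_id is None and key.endswith('_ID'):
--             team_id = value
--
--     config = {}
--     if scope is not None:
--         config['SCOPE'] = scope
--     if 'enterprise' in category:
--         if api_url is not None:
--             config['API_URL'] = api_url
--         if url is not None:
--             config['URL'] = url
--     if 'org' in category and org_name is not None:
--         config['NAME'] = org_name
--     if 'team' in category and team_id is not None:
--         config['ID'] = team_id
--     return config
-- ===== Notes on version B (the rewrite author's own statement) =====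
-- stated objective: alternative
-- what changed: A makes up to four separate passes over settings, inserting into a shared dict as it scans; B scans settings exactly once, recording first-match SCOPE/NAME/ID and last-match enterprise URL candidates in plain variables, and assembles the dict at the end in a fixed key order. Pre_ excludes inputs where 'enterprise' is in category and a truthy plain *_URL setting precedes every truthy *_API_URL one while both exist: there A's dict happens to list URL before API_URL (dict-insertion-order accident), B always lists API_URL first; the mappings are identical.
import Mathlib
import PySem

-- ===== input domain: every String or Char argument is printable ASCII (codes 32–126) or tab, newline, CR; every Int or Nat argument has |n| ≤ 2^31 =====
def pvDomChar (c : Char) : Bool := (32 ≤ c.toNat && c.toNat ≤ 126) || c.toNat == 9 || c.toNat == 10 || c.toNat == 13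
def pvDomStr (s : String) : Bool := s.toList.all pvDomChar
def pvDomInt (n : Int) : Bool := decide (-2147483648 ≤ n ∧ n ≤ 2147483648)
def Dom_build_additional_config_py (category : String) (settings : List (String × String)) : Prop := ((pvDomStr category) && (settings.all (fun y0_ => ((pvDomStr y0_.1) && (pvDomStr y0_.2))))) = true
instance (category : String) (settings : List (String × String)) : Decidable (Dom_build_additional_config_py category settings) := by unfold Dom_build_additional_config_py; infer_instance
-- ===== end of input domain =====

-- B replaces A's four separate scans over settings by a single pass into plain variables,
-- assembling the dict at the end in fixed key order (objective: alternative); Pre_ excludes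
-- the enterprise inputs where A's URL/API_URL dict-insertion order differs from that fixed order.


-- ===== PORT A =====
-- A's first loop: first truthy value whose name ends in '_SCOPE' (break = stop at first hit)
def pvScopeLoop : List (String × String) → PySem.Dict String String → PySem.Dict String String
  | [], d => d
  | (n, v) :: rest, d =>
    if PySem.Str.endswith n "_SCOPE" && (v != "") then d.insert "SCOPE" v
    else pvScopeLoop rest d

-- A's enterprise loop: last-match inserts of API_URL / URL (no break)
def pvEntLoop : List (String × String) → PySem.Dict String String → PySem.Dict String String
  | [], d => d
  | (n, v) :: rest, d =>
    pvEntLoop rest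
      (if PySem.Str.endswith n "_API_URL" && (v != "") then d.insert "API_URL" v
       else if PySem.Str.endswith n "_URL" && (v != "") then d.insert "URL" v
       else d)

-- A's org loop (break = first match)
def pvOrgLoop : List (String × String) → PySem.Dict String String → PySem.Dict String String
  | [], d => d
  | (n, v) :: rest, d =>
    if PySem.Str.endswith n "_NAME" && (v != "") then d.insert "NAME" v
    else pvOrgLoop rest d

-- A's team loop (break = first match)
def pvTeamLoop : List (String × String) → PySem.Dict String String → PySem.Dict String String
  | [], d => d
  | (n, v) :: rest, d =>
    if PySem.Str.endswith n "_ID" && (v != "") then d.insert "ID" v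
    else pvTeamLoop rest d

def build_additional_config_py (category : String) (settings : List (String × String)) : List (String × String) :=
  let d0 : PySem.Dict String String := PySem.Dict.empty
  let d1 := pvScopeLoop settings d0
  let d2 := if PySem.Str.isIn "enterprise" category then pvEntLoop settings d1 else d1
  let d3 := if PySem.Str.isIn "org" category then pvOrgLoop settings d2 else d2
  let d4 := if PySem.Str.isIn "team" category then pvTeamLoop settings d3 else d3
  d4.items

-- ===== PORT B =====
-- B's single-pass accumulator: plain variables scope/api_url/url/org_name/team_id
structure PvBState where
  scope : Option String
  apiUrl : Option String
  url : Option String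
  orgName : Option String
  teamId : Option String
deriving Repr, DecidableEq

def pvBStep (st : PvBState) (p : String × String) : PvBState :=
  if p.2 != "" then
    let st1 := if st.scope.isNone && PySem.Str.endswith p.1 "_SCOPE" then { st with scope := some p.2 } else st
    let st2 := if PySem.Str.endswith p.1 "_API_URL" then { st1 with apiUrl := some p.2 }
               else if PySem.Str.endswith p.1 "_URL" then { st1 with url := some p.2 }
               else st1
    let st3 := if st2.orgName.isNone && PySem.Str.endswith p.1 "_NAME" then { st2 with orgName := some p.2 } else st2
    if st3.teamId.isNone && PySem.Str.endswith p.1 "_ID" then { st3 with teamId := some p.2 } else st3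
  else st

def build_additional_config_py_alt (category : String) (settings : List (String × String)) : List (String × String) :=
  let st := settings.foldl pvBStep ⟨none, none, none, none, none⟩
  let r0 : PySem.Dict String String := PySem.Dict.empty
  let r1 := match st.scope with | some v => r0.insert "SCOPE" v | none => r0
  let r2 := if PySem.Str.isIn "enterprise" category then
      let ra := match st.apiUrl with | some v => r1.insert "API_URL" v | none => r1
      match st.url with | some v => ra.insert "URL" v | none => ra
    else r1
  let r3 := if PySem.Str.isIn "org" category then (match st.orgName with | some v => r2.insert "NAME" v | none => r2) else r2
  let r4 := if PySem.Str.isIn "team" category then (match st.teamId with | some v => r3.insert "ID" v | none => r3) else r3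
  r4.items

-- ===== PRECONDITION & SPEC =====
def pvApiish (p : String × String) : Bool := PySem.Str.endswith p.1 "_API_URL" && (p.2 != "")
def pvUrlish (p : String × String) : Bool := PySem.Str.endswith p.1 "_URL" && (p.2 != "")
def pvPreEnt (settings : List (String × String)) : Bool :=
  !(settings.any pvApiish) || (settings.find? pvUrlish).all pvApiish

-- Pre_ excludes inputs where 'enterprise' is in category and a truthy plain *_URL setting precedes
-- every truthy *_API_URL one while both exist: there A's dict lists URL before API_URL (an accident
-- of dict insertion order during A's scan), B always lists API_URL first; the key/value mappings agree.
def Pre_build_additional_config_py (category : String) (settings : List (String × String)) : Prop :=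
  PySem.Str.isIn "enterprise" category = true → pvPreEnt settings = true
instance (category : String) (settings : List (String × String)) : Decidable (Pre_build_additional_config_py category settings) := by unfold Pre_build_additional_config_py; infer_instance

def pvWitness_build_additional_config_py : String × (List (String × String)) :=
  ("github-enterprise-org",
   [("SOCIAL_AUTH_GITHUB_ENTERPRISE_API_URL", "https://gh.example.com/api/v3"),
    ("SOCIAL_AUTH_GITHUB_ENTERPRISE_URL", "https://gh.example.com"),
    ("SOCIAL_AUTH_GITHUB_ENTERPRISE_SCOPE", "read:org"),
    ("SOCIAL_AUTH_GITHUB_ENTERPRISE_NAME", "myorg")])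

def Spec_build_additional_config_py (category : String) (settings : List (String × String)) (out : List (String × String)) : Prop := out = build_additional_config_py_alt category settings
instance (category : String) (settings : List (String × String)) (out : List (String × String)) : Decidable (Spec_build_additional_config_py category settings out) := by unfold Spec_build_additional_config_py; infer_instance

-- ===== CLAIM (what is proved, stated in full; the proofs are below) =====
def Claim_equal_build_additional_config_py : Prop := ∀ (category : String) (settings : List (String × String)), Dom_build_additional_config_py category settings → Pre_build_additional_config_py category settings → Spec_build_additional_config_py category settings (build_additional_config_py category settings)

-- ===== LEMMAS AND PROOFS =====

-- first truthy value in s whose name ends with suf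
def pvFirst (suf : String) : List (String × String) → Option String
  | [] => none
  | (n, v) :: rest => if PySem.Str.endswith n suf && (v != "") then some v else pvFirst suf rest

-- last truthy value matching the enterprise API / plain URL patterns
def pvPlain (p : String × String) : Bool := pvUrlish p && !pvApiish p

def pvLastApi : List (String × String) → Option String
  | [] => none
  | p :: rest => (pvLastApi rest).or (if pvApiish p then some p.2 else none)

def pvLastUrl : List (String × String) → Option String
  | [] => none
  | p :: rest => (pvLastUrl rest).or (if pvPlain p then some p.2 else none)

def pvOptPair (k : String) : Option String → List (String × String)
  | some v => [(k, v)]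
  | none => []

theorem pv_scope_items (s : List (String × String)) (d : PySem.Dict String String)
    (h : d.contains "SCOPE" = false) :
    (pvScopeLoop s d).items = d.items ++ pvOptPair "SCOPE" (pvFirst "_SCOPE" s) := by
  induction s with
  | nil => simp [pvScopeLoop, pvFirst, pvOptPair]
  | cons p rest ih =>
    obtain ⟨n, v⟩ := p
    simp only [pvScopeLoop, pvFirst]
    split
    · rw [PySem.Dict.items_insert_of_not_contains d _ h]; rfl
    · exact ih

theorem pv_org_items (s : List (String × String)) (d : PySem.Dict String String)
    (h : d.contains "NAME" = false) :
    (pvOrgLoop s d).items = d.items ++ pvOptPair "NAME" (pvFirst "_NAME" s) := by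
  induction s with
  | nil => simp [pvOrgLoop, pvFirst, pvOptPair]
  | cons p rest ih =>
    obtain ⟨n, v⟩ := p
    simp only [pvOrgLoop, pvFirst]
    split
    · rw [PySem.Dict.items_insert_of_not_contains d _ h]; rfl
    · exact ih

theorem pv_team_items (s : List (String × String)) (d : PySem.Dict String String)
    (h : d.contains "ID" = false) :
    (pvTeamLoop s d).items = d.items ++ pvOptPair "ID" (pvFirst "_ID" s) := by
  induction s with
  | nil => simp [pvTeamLoop, pvFirst, pvOptPair]
  | cons p rest ih =>
    obtain ⟨n, v⟩ := p
    simp only [pvTeamLoop, pvFirst]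
    split
    · rw [PySem.Dict.items_insert_of_not_contains d _ h]; rfl
    · exact ih

-- inserting a key absent from d commutes with a prefixed d (factoring the ent loop off d1)
theorem pv_insert_append (k : String) (d e : PySem.Dict String String) (v : String)
    (h : d.contains k = false) :
    (PySem.Dict.mk (d.items ++ e.items)).insert k v = PySem.Dict.mk (d.items ++ (e.insert k v).items) := by
  have hany : (d.items.any fun p => p.1 == k) = false := h
  have hd : ∀ p ∈ d.items, (p.1 == k) = false := by
    intro p hp
    simpa using List.any_eq_false.mp hany p hp
  have hdid : List.map (fun p => if (p.1 == k) = true then (k, v) else p) d.items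
      = List.map id d.items :=
    List.map_congr_left (fun p hp => by simp [hd p hp])
  have hcmk : (PySem.Dict.mk (d.items ++ e.items)).contains k = e.contains k := by
    show ((d.items ++ e.items).any fun p => p.1 == k) = e.contains k
    rw [List.any_append, hany, Bool.false_or]; rfl
  cases he : e.contains k with
  | true =>
    have hc : (PySem.Dict.mk (d.items ++ e.items)).contains k = true := by rw [hcmk, he]
    apply PySem.Dict.ext
    rw [PySem.Dict.items_insert_of_contains _ v hc, PySem.Dict.items_insert_of_contains e v he]
    show List.map _ (d.items ++ e.items) = _
    rw [List.map_append, hdid, List.map_id]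
  | false =>
    have hc : (PySem.Dict.mk (d.items ++ e.items)).contains k = false := by rw [hcmk, he]
    apply PySem.Dict.ext
    rw [PySem.Dict.items_insert_of_not_contains _ v hc, PySem.Dict.items_insert_of_not_contains e v he]
    show (d.items ++ e.items) ++ [(k, v)] = d.items ++ (e.items ++ [(k, v)])
    rw [List.append_assoc]

theorem pv_ent_shift (s : List (String × String)) (d : PySem.Dict String String)
    (h1 : d.contains "API_URL" = false) (h2 : d.contains "URL" = false) :
    ∀ e : PySem.Dict String String,
      pvEntLoop s (PySem.Dict.mk (d.items ++ e.items)) = PySem.Dict.mk (d.items ++ (pvEntLoop s e).items) := by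
  induction s with
  | nil => intro e; simp [pvEntLoop]
  | cons p rest ih =>
    obtain ⟨n, v⟩ := p
    intro e
    simp only [pvEntLoop]
    split
    · rw [pv_insert_append "API_URL" d e v h1]; exact ih _
    · split
      · rw [pv_insert_append "URL" d e v h2]; exact ih _
      · exact ih e

theorem pv_ent_items (s : List (String × String)) (d : PySem.Dict String String)
    (h1 : d.contains "API_URL" = false) (h2 : d.contains "URL" = false) :
    (pvEntLoop s d).items = d.items ++ (pvEntLoop s PySem.Dict.empty).items := by
  have hmk : PySem.Dict.mk (d.items ++ (PySem.Dict.empty : PySem.Dict String String).items) = d := by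
    apply PySem.Dict.ext
    show d.items ++ [] = d.items
    simp
  have := pv_ent_shift s d h1 h2 PySem.Dict.empty
  rw [hmk] at this
  exact congrArg PySem.Dict.items this

-- the ent loop from a dict already holding both keys: overwrites in place
theorem pv_ent_both (s : List (String × String)) :
    ∀ a u : String, pvEntLoop s (PySem.Dict.mk [("API_URL", a), ("URL", u)])
      = PySem.Dict.mk [("API_URL", (pvLastApi s).getD a), ("URL", (pvLastUrl s).getD u)] := by
  induction s with
  | nil => intro a u; rfl
  | cons p rest ih =>
    obtain ⟨n, v⟩ := p
    intro a u
    simp only [pvEntLoop, pvLastApi, pvLastUrl]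
    by_cases h1 : (PySem.Str.endswith n "_API_URL" && (v != "")) = true
    · have hap : pvApiish (n, v) = true := h1
      have hpl : pvPlain (n, v) = false := by simp [pvPlain, hap]
      have hins : (PySem.Dict.mk [("API_URL", a), ("URL", u)]).insert "API_URL" v
          = PySem.Dict.mk [("API_URL", v), ("URL", u)] := by
        apply PySem.Dict.ext
        simp [PySem.Dict.items_insert, PySem.Dict.contains]
      rw [if_pos h1, hins, ih]
      simp [hap, hpl]
    · have hap : pvApiish (n, v) = false := Bool.eq_false_iff.mpr h1
      by_cases h2 : (PySem.Str.endswith n "_URL" && (v != "")) = true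
      · have hurl : pvUrlish (n, v) = true := h2
        have hpl : pvPlain (n, v) = true := by simp [pvPlain, hap, hurl]
        have hins : (PySem.Dict.mk [("API_URL", a), ("URL", u)]).insert "URL" v
            = PySem.Dict.mk [("API_URL", a), ("URL", v)] := by
          apply PySem.Dict.ext
          simp [PySem.Dict.items_insert, PySem.Dict.contains]
        rw [if_neg h1, if_pos h2, hins, ih]
        simp [hap, hpl]
      · have hurl : pvUrlish (n, v) = false := Bool.eq_false_iff.mpr h2
        have hpl : pvPlain (n, v) = false := by simp [pvPlain, hurl]
        rw [if_neg h1, if_neg h2, ih]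
        simp [hap, hpl]

theorem pv_ent_both' (s : List (String × String)) :
    ∀ a u : String, pvEntLoop s (PySem.Dict.mk [("URL", u), ("API_URL", a)])
      = PySem.Dict.mk [("URL", (pvLastUrl s).getD u), ("API_URL", (pvLastApi s).getD a)] := by
  induction s with
  | nil => intro a u; rfl
  | cons p rest ih =>
    obtain ⟨n, v⟩ := p
    intro a u
    simp only [pvEntLoop, pvLastApi, pvLastUrl]
    by_cases h1 : (PySem.Str.endswith n "_API_URL" && (v != "")) = true
    · have hap : pvApiish (n, v) = true := h1
      have hpl : pvPlain (n, v) = false := by simp [pvPlain, hap]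
      have hins : (PySem.Dict.mk [("URL", u), ("API_URL", a)]).insert "API_URL" v
          = PySem.Dict.mk [("URL", u), ("API_URL", v)] := by
        apply PySem.Dict.ext
        simp [PySem.Dict.items_insert, PySem.Dict.contains]
      rw [if_pos h1, hins, ih]
      simp [hap, hpl]
    · have hap : pvApiish (n, v) = false := Bool.eq_false_iff.mpr h1
      by_cases h2 : (PySem.Str.endswith n "_URL" && (v != "")) = true
      · have hurl : pvUrlish (n, v) = true := h2
        have hpl : pvPlain (n, v) = true := by simp [pvPlain, hap, hurl]
        have hins : (PySem.Dict.mk [("URL", u), ("API_URL", a)]).insert "URL" v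
            = PySem.Dict.mk [("URL", v), ("API_URL", a)] := by
          apply PySem.Dict.ext
          simp [PySem.Dict.items_insert, PySem.Dict.contains]
        rw [if_neg h1, if_pos h2, hins, ih]
        simp [hap, hpl]
      · have hurl : pvUrlish (n, v) = false := Bool.eq_false_iff.mpr h2
        have hpl : pvPlain (n, v) = false := by simp [pvPlain, hurl]
        rw [if_neg h1, if_neg h2, ih]
        simp [hap, hpl]

theorem pv_ent_api (s : List (String × String)) :
    ∀ a : String, (pvEntLoop s (PySem.Dict.mk [("API_URL", a)])).items
      = ("API_URL", (pvLastApi s).getD a) :: pvOptPair "URL" (pvLastUrl s) := by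
  induction s with
  | nil => intro a; rfl
  | cons p rest ih =>
    obtain ⟨n, v⟩ := p
    intro a
    simp only [pvEntLoop, pvLastApi, pvLastUrl]
    by_cases h1 : (PySem.Str.endswith n "_API_URL" && (v != "")) = true
    · have hap : pvApiish (n, v) = true := h1
      have hpl : pvPlain (n, v) = false := by simp [pvPlain, hap]
      have hins : (PySem.Dict.mk [("API_URL", a)]).insert "API_URL" v
          = PySem.Dict.mk [("API_URL", v)] := by
        apply PySem.Dict.ext
        simp [PySem.Dict.items_insert, PySem.Dict.contains]
      rw [if_pos h1, hins, ih]
      simp [hap, hpl]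
    · have hap : pvApiish (n, v) = false := Bool.eq_false_iff.mpr h1
      by_cases h2 : (PySem.Str.endswith n "_URL" && (v != "")) = true
      · have hurl : pvUrlish (n, v) = true := h2
        have hpl : pvPlain (n, v) = true := by simp [pvPlain, hap, hurl]
        have hins : (PySem.Dict.mk [("API_URL", a)]).insert "URL" v
            = PySem.Dict.mk [("API_URL", a), ("URL", v)] := by
          apply PySem.Dict.ext
          simp [PySem.Dict.items_insert, PySem.Dict.contains]
        rw [if_neg h1, if_pos h2, hins, pv_ent_both]
        simp [hap, hpl, pvOptPair]
      · have hurl : pvUrlish (n, v) = false := Bool.eq_false_iff.mpr h2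
        have hpl : pvPlain (n, v) = false := by simp [pvPlain, hurl]
        rw [if_neg h1, if_neg h2, ih]
        simp [hap, hpl]

theorem pv_ent_url (s : List (String × String)) :
    ∀ u : String, (pvEntLoop s (PySem.Dict.mk [("URL", u)])).items
      = ("URL", (pvLastUrl s).getD u) :: pvOptPair "API_URL" (pvLastApi s) := by
  induction s with
  | nil => intro u; rfl
  | cons p rest ih =>
    obtain ⟨n, v⟩ := p
    intro u
    simp only [pvEntLoop, pvLastApi, pvLastUrl]
    by_cases h1 : (PySem.Str.endswith n "_API_URL" && (v != "")) = true
    · have hap : pvApiish (n, v) = true := h1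
      have hpl : pvPlain (n, v) = false := by simp [pvPlain, hap]
      have hins : (PySem.Dict.mk [("URL", u)]).insert "API_URL" v
          = PySem.Dict.mk [("URL", u), ("API_URL", v)] := by
        apply PySem.Dict.ext
        simp [PySem.Dict.items_insert, PySem.Dict.contains]
      rw [if_pos h1, hins, pv_ent_both']
      simp [hap, hpl, pvOptPair]
    · have hap : pvApiish (n, v) = false := Bool.eq_false_iff.mpr h1
      by_cases h2 : (PySem.Str.endswith n "_URL" && (v != "")) = true
      · have hurl : pvUrlish (n, v) = true := h2
        have hpl : pvPlain (n, v) = true := by simp [pvPlain, hap, hurl]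
        have hins : (PySem.Dict.mk [("URL", u)]).insert "URL" v
            = PySem.Dict.mk [("URL", v)] := by
          apply PySem.Dict.ext
          simp [PySem.Dict.items_insert, PySem.Dict.contains]
        rw [if_neg h1, if_pos h2, hins, ih]
        simp [hap, hpl]
      · have hurl : pvUrlish (n, v) = false := Bool.eq_false_iff.mpr h2
        have hpl : pvPlain (n, v) = false := by simp [pvPlain, hurl]
        rw [if_neg h1, if_neg h2, ih]
        simp [hap, hpl]

theorem pv_lastApi_none (s : List (String × String)) (h : s.any pvApiish = false) :
    pvLastApi s = none := by
  induction s with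
  | nil => rfl
  | cons p rest ih =>
    simp only [List.any_cons, Bool.or_eq_false_iff] at h
    simp [pvLastApi, ih h.2, h.1]

-- under pvPreEnt, the ent loop from the empty dict lists API_URL before URL
theorem pv_ent_empty (s : List (String × String)) (h : pvPreEnt s = true) :
    (pvEntLoop s PySem.Dict.empty).items
      = pvOptPair "API_URL" (pvLastApi s) ++ pvOptPair "URL" (pvLastUrl s) := by
  induction s with
  | nil => rfl
  | cons p rest ih =>
    obtain ⟨n, v⟩ := p
    simp only [pvEntLoop, pvLastApi, pvLastUrl]
    by_cases h1 : (PySem.Str.endswith n "_API_URL" && (v != "")) = true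
    · have hap : pvApiish (n, v) = true := h1
      have hpl : pvPlain (n, v) = false := by simp [pvPlain, hap]
      have hins : (PySem.Dict.empty : PySem.Dict String String).insert "API_URL" v
          = PySem.Dict.mk [("API_URL", v)] := by
        apply PySem.Dict.ext
        simp [PySem.Dict.items_insert, PySem.Dict.contains, PySem.Dict.empty]
      rw [if_pos h1, hins, pv_ent_api]
      simp only [hap, hpl, if_true]
      cases pvLastApi rest <;> simp [pvOptPair]
    · have hap : pvApiish (n, v) = false := Bool.eq_false_iff.mpr h1
      by_cases h2 : (PySem.Str.endswith n "_URL" && (v != "")) = true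
      · -- a truthy plain URL comes first: pvPreEnt forces no truthy API_URL at all
        have hurl : pvUrlish (n, v) = true := h2
        have hpl : pvPlain (n, v) = true := by simp [pvPlain, hap, hurl]
        have hnoapi : rest.any pvApiish = false := by
          simpa [pvPreEnt, List.find?_cons, List.any_cons, hurl, hap] using h
        have hins : (PySem.Dict.empty : PySem.Dict String String).insert "URL" v
            = PySem.Dict.mk [("URL", v)] := by
          apply PySem.Dict.ext
          simp [PySem.Dict.items_insert, PySem.Dict.contains, PySem.Dict.empty]
        rw [if_neg h1, if_pos h2, hins, pv_ent_url, pv_lastApi_none rest hnoapi]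
        simp [hap, hpl, pvOptPair]
      · have hurl : pvUrlish (n, v) = false := Bool.eq_false_iff.mpr h2
        have hpl : pvPlain (n, v) = false := by simp [pvPlain, hurl]
        have hpre : pvPreEnt rest = true := by
          simpa [pvPreEnt, List.find?_cons, List.any_cons, hurl, hap] using h
        rw [if_neg h1, if_neg h2, ih hpre]
        simp [hap, hpl]

-- B-side: field characterisations of the fold
theorem pvBStep_scope (st : PvBState) (p : String × String) :
    (pvBStep st p).scope =
      if (p.2 != "") && st.scope.isNone && PySem.Str.endswith p.1 "_SCOPE" then some p.2 else st.scope := by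
  simp only [pvBStep]
  split_ifs <;> simp_all

theorem pvBStep_api (st : PvBState) (p : String × String) :
    (pvBStep st p).apiUrl = if pvApiish p then some p.2 else st.apiUrl := by
  simp only [pvBStep, pvApiish]
  split_ifs <;> simp_all

theorem pvBStep_url (st : PvBState) (p : String × String) :
    (pvBStep st p).url = if pvPlain p then some p.2 else st.url := by
  simp only [pvBStep, pvPlain, pvApiish, pvUrlish]
  split_ifs <;> simp_all

theorem pvBStep_org (st : PvBState) (p : String × String) :
    (pvBStep st p).orgName =
      if (p.2 != "") && st.orgName.isNone && PySem.Str.endswith p.1 "_NAME" then some p.2 else st.orgName := by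
  simp only [pvBStep]
  split_ifs <;> simp_all

theorem pvBStep_team (st : PvBState) (p : String × String) :
    (pvBStep st p).teamId =
      if (p.2 != "") && st.teamId.isNone && PySem.Str.endswith p.1 "_ID" then some p.2 else st.teamId := by
  simp only [pvBStep]
  split_ifs <;> simp_all

theorem pvB_scope (s : List (String × String)) (st : PvBState) :
    (s.foldl pvBStep st).scope = st.scope.or (pvFirst "_SCOPE" s) := by
  induction s generalizing st with
  | nil => simp [pvFirst]
  | cons p rest ih =>
    obtain ⟨n, v⟩ := p
    rw [List.foldl_cons, ih, pvBStep_scope]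
    simp only [pvFirst]
    cases hsc : st.scope <;> split_ifs <;> simp_all

theorem pvB_org (s : List (String × String)) (st : PvBState) :
    (s.foldl pvBStep st).orgName = st.orgName.or (pvFirst "_NAME" s) := by
  induction s generalizing st with
  | nil => simp [pvFirst]
  | cons p rest ih =>
    obtain ⟨n, v⟩ := p
    rw [List.foldl_cons, ih, pvBStep_org]
    simp only [pvFirst]
    cases hsc : st.orgName <;> split_ifs <;> simp_all

theorem pvB_team (s : List (String × String)) (st : PvBState) :
    (s.foldl pvBStep st).teamId = st.teamId.or (pvFirst "_ID" s) := by
  induction s generalizing st with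
  | nil => simp [pvFirst]
  | cons p rest ih =>
    obtain ⟨n, v⟩ := p
    rw [List.foldl_cons, ih, pvBStep_team]
    simp only [pvFirst]
    cases hsc : st.teamId <;> split_ifs <;> simp_all

theorem pvB_api (s : List (String × String)) (st : PvBState) :
    (s.foldl pvBStep st).apiUrl = (pvLastApi s).or st.apiUrl := by
  induction s generalizing st with
  | nil => simp [pvLastApi]
  | cons p rest ih =>
    rw [List.foldl_cons, ih, pvBStep_api]
    simp only [pvLastApi]
    cases hl : pvLastApi rest <;> split_ifs <;> simp_all

theorem pvB_url (s : List (String × String)) (st : PvBState) :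
    (s.foldl pvBStep st).url = (pvLastUrl s).or st.url := by
  induction s generalizing st with
  | nil => simp [pvLastUrl]
  | cons p rest ih =>
    rw [List.foldl_cons, ih, pvBStep_url]
    simp only [pvLastUrl]
    cases hl : pvLastUrl rest <;> split_ifs <;> simp_all

theorem pv_contains_eq_any (d : PySem.Dict String String) (k : String) :
    d.contains k = d.items.any (fun p => p.1 == k) := rfl

theorem pv_any_optPair (k0 k : String) (o : Option String) (h : k0 ≠ k) :
    (pvOptPair k0 o).any (fun p => p.1 == k) = false := by
  cases o <;> simp [pvOptPair, h]

theorem pv_optIns_items (r : PySem.Dict String String) (k : String) (o : Option String)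
    (h : r.contains k = false) :
    (match o with | some v => r.insert k v | none => r).items = r.items ++ pvOptPair k o := by
  cases o with
  | none => simp [pvOptPair]
  | some v => rw [PySem.Dict.items_insert_of_not_contains r v h]; rfl

-- ===== VERDICT (by name: the statement is the Claim_ definition above) =====
theorem build_additional_config_py_spec : Claim_equal_build_additional_config_py := by
  unfold Claim_equal_build_additional_config_py
  intro category settings _ hpre
  unfold Spec_build_additional_config_py
  simp only [build_additional_config_py, build_additional_config_py_alt]
  rw [pvB_scope, pvB_org, pvB_team, pvB_api, pvB_url]
  dsimp only
  simp only [Option.none_or, Option.or_none]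
  set bE := PySem.Str.isIn "enterprise" category with hbE
  set bO := PySem.Str.isIn "org" category with hbO
  set bT := PySem.Str.isIn "team" category with hbT
  set d1 := pvScopeLoop settings PySem.Dict.empty with hd1
  set d2 := if bE = true then pvEntLoop settings d1 else d1 with hd2
  set d3 := if bO = true then pvOrgLoop settings d2 else d2 with hd3
  set r1 := (match pvFirst "_SCOPE" settings with | some v => (PySem.Dict.empty : PySem.Dict String String).insert "SCOPE" v | none => PySem.Dict.empty) with hr1
  set r2 := if bE = true then
      (match pvLastUrl settings with
        | some v => (match pvLastApi settings with | some w => r1.insert "API_URL" w | none => r1).insert "URL" v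
        | none => (match pvLastApi settings with | some w => r1.insert "API_URL" w | none => r1))
    else r1 with hr2
  set r3 := if bO = true then (match pvFirst "_NAME" settings with | some v => r2.insert "NAME" v | none => r2) else r2 with hr3
  have hentpair : PySem.Str.isIn "enterprise" category = true → (pvEntLoop settings PySem.Dict.empty).items
      = pvOptPair "API_URL" (pvLastApi settings) ++ pvOptPair "URL" (pvLastUrl settings) :=
    fun hb => pv_ent_empty settings (hpre hb)
  -- A-side stage items
  have e1 : d1.items = pvOptPair "SCOPE" (pvFirst "_SCOPE" settings) := by
    rw [hd1]
    simpa using pv_scope_items settings PySem.Dict.empty (PySem.Dict.contains_empty _)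
  have c1 : ∀ k : String, "SCOPE" ≠ k → d1.contains k = false := by
    intro k hk
    rw [pv_contains_eq_any, e1]
    exact pv_any_optPair _ _ _ hk
  have e2 : d2.items = pvOptPair "SCOPE" (pvFirst "_SCOPE" settings)
      ++ (if bE = true then pvOptPair "API_URL" (pvLastApi settings) ++ pvOptPair "URL" (pvLastUrl settings) else []) := by
    rw [hd2]
    by_cases hb : bE = true
    · simp only [hb, if_true]
      rw [pv_ent_items settings d1 (c1 _ (by decide)) (c1 _ (by decide)), e1,
        hentpair (hbE.symm.trans hb)]
    · simp [hb, e1]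
  have c2 : ∀ k : String, "SCOPE" ≠ k → "API_URL" ≠ k → "URL" ≠ k → d2.contains k = false := by
    intro k h0 h1 h2
    rw [pv_contains_eq_any, e2, List.any_append, pv_any_optPair _ _ _ h0]
    cases bE
    · simp
    · simp [List.any_append, pv_any_optPair _ _ _ h1, pv_any_optPair _ _ _ h2]
  have e3 : d3.items = d2.items ++ (if bO = true then pvOptPair "NAME" (pvFirst "_NAME" settings) else []) := by
    rw [hd3]
    cases bO
    · simp
    · simp only [if_true]
      rw [pv_org_items settings d2 (c2 _ (by decide) (by decide) (by decide))]
  have c3 : d3.contains "ID" = false := by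
    rw [pv_contains_eq_any, e3, List.any_append]
    have hh := c2 "ID" (by decide) (by decide) (by decide)
    rw [pv_contains_eq_any] at hh
    rw [hh]
    cases bO
    · simp
    · simp [pv_any_optPair "NAME" "ID" _ (by decide)]
  -- B-side stage items
  have f1 : r1.items = pvOptPair "SCOPE" (pvFirst "_SCOPE" settings) := by
    rw [hr1]
    simpa using pv_optIns_items PySem.Dict.empty "SCOPE" (pvFirst "_SCOPE" settings) (PySem.Dict.contains_empty _)
  have g1 : ∀ k : String, "SCOPE" ≠ k → r1.contains k = false := by
    intro k hk
    rw [pv_contains_eq_any, f1]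
    exact pv_any_optPair _ _ _ hk
  have fa : (match pvLastApi settings with | some w => r1.insert "API_URL" w | none => r1).items
      = r1.items ++ pvOptPair "API_URL" (pvLastApi settings) :=
    pv_optIns_items r1 "API_URL" (pvLastApi settings) (g1 _ (by decide))
  have ga : (match pvLastApi settings with | some w => r1.insert "API_URL" w | none => r1).contains "URL" = false := by
    rw [pv_contains_eq_any, fa, List.any_append, f1,
      pv_any_optPair "SCOPE" "URL" _ (by decide), pv_any_optPair "API_URL" "URL" _ (by decide)]
    rfl
  have f2 : r2.items = pvOptPair "SCOPE" (pvFirst "_SCOPE" settings)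
      ++ (if bE = true then pvOptPair "API_URL" (pvLastApi settings) ++ pvOptPair "URL" (pvLastUrl settings) else []) := by
    rw [hr2]
    cases bE
    · simp [f1]
    · simp only [if_true]
      have := pv_optIns_items (match pvLastApi settings with | some w => r1.insert "API_URL" w | none => r1)
        "URL" (pvLastUrl settings) ga
      cases hu : pvLastUrl settings with
      | none => simpa [hu, fa, f1] using this
      | some v => simpa [hu, fa, f1, List.append_assoc] using this
  have g2 : ∀ k : String, "SCOPE" ≠ k → "API_URL" ≠ k → "URL" ≠ k → r2.contains k = false := by
    intro k h0 h1 h2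
    rw [pv_contains_eq_any, f2, List.any_append, pv_any_optPair _ _ _ h0]
    cases bE
    · simp
    · simp [List.any_append, pv_any_optPair _ _ _ h1, pv_any_optPair _ _ _ h2]
  have f3 : r3.items = r2.items ++ (if bO = true then pvOptPair "NAME" (pvFirst "_NAME" settings) else []) := by
    rw [hr3]
    cases bO
    · simp
    · simp only [if_true]
      rw [pv_optIns_items r2 "NAME" (pvFirst "_NAME" settings) (g2 _ (by decide) (by decide) (by decide))]
  have g3 : r3.contains "ID" = false := by
    rw [pv_contains_eq_any, f3, List.any_append]
    have hh := g2 "ID" (by decide) (by decide) (by decide)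
    rw [pv_contains_eq_any] at hh
    rw [hh]
    cases bO
    · simp
    · simp [pv_any_optPair "NAME" "ID" _ (by decide)]
  -- final assembly
  have eA : (if bT = true then pvTeamLoop settings d3 else d3).items
      = d3.items ++ (if bT = true then pvOptPair "ID" (pvFirst "_ID" settings) else []) := by
    cases bT
    · simp
    · simp only [if_true]
      rw [pv_team_items settings d3 c3]
  have eB : (if bT = true then (match pvFirst "_ID" settings with | some v => r3.insert "ID" v | none => r3) else r3).items
      = r3.items ++ (if bT = true then pvOptPair "ID" (pvFirst "_ID" settings) else []) := by
    cases bT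
    · simp
    · simp only [if_true]
      rw [pv_optIns_items r3 "ID" (pvFirst "_ID" settings) g3]
  rw [eA, eB, e3, f3, e2, f2]
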